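-- pv_equiv track=rewrite | github.com/hiennguyen-tth/loto535 | backend/engine.py | _is_valid_set
-- ===== SOURCE A (Python) =====
-- GAME_CONFIGS = {
--     "535": {
--         "main_n": 5, "main_max": 35, "has_power": False,
--         "has_db": True, "db_max": 12,
--         "table": "results", "score_table": "scoring_cache",
--         "score_db_table": "scoring_db",
--         "sum_min": 55, "sum_max": 125, "spread_min": 8,
--         "select_cols": "s1,s2,s3,s4,s5,db",
--     },
--     "645": {
--         "main_n": 6, "main_max": 45, "has_power": False,
--         "has_db": False, "db_max": None,
--         "table": "results_645", "score_table": "scoring_645",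
--         "score_db_table": None,
--         "sum_min": 75, "sum_max": 210, "spread_min": 10,
--         "select_cols": "s1,s2,s3,s4,s5,s6",
--     },
--     "655": {
--         "main_n": 6, "main_max": 55, "has_power": True,
--         "has_db": False, "db_max": 55,
--         "table": "results_655", "score_table": "scoring_655",
--         "score_db_table": "scoring_655_power",
--         "sum_min": 85, "sum_max": 240, "spread_min": 12,
--         "select_cols": "s1,s2,s3,s4,s5,s6,power",
--     },
-- }
--
-- def _is_valid_set(nums: list[int], game: str = "535") -> bool:
--     """Loại bỏ bộ số thống kê bất thường dựa theo game."""
--     cfg = GAME_CONFIGS[game]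
--     s = sorted(nums)
--     total = sum(s)
--     n = len(s)
--
--     if not (cfg["sum_min"] <= total <= cfg["sum_max"]):
--         return False
--     if s[-1] - s[0] < cfg["spread_min"]:
--         return False
--     evens = sum(1 for x in s if x % 2 == 0)
--     if evens == 0 or evens == n:
--         return False
--     consecutive = sum(1 for a, b in zip(s, s[1:]) if b - a == 1)
--     if consecutive >= 4:
--         return False
--     return True
-- ===== SOURCE B (Python) =====
-- GAME_CONFIGS = {
--     "535": {
--         "main_n": 5, "main_max": 35, "has_power": False,
--         "has_db": True, "db_max": 12,
--         "table": "results", "score_table": "scoring_cache",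
--         "score_db_table": "scoring_db",
--         "sum_min": 55, "sum_max": 125, "spread_min": 8,
--         "select_cols": "s1,s2,s3,s4,s5,db",
--     },
--     "645": {
--         "main_n": 6, "main_max": 45, "has_power": False,
--         "has_db": False, "db_max": None,
--         "table": "results_645", "score_table": "scoring_645",
--         "score_db_table": None,
--         "sum_min": 75, "sum_max": 210, "spread_min": 10,
--         "select_cols": "s1,s2,s3,s4,s5,s6",
--     },
--     "655": {
--         "main_n": 6, "main_max": 55, "has_power": True,
--         "has_db": False, "db_max": 55,
--         "table": "results_655", "score_table": "scoring_655",
--         "score_db_table": "scoring_655_power",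
--         "sum_min": 85, "sum_max": 240, "spread_min": 12,
--         "select_cols": "s1,s2,s3,s4,s5,s6,power",
--     },
-- }
--
-- def _is_valid_set(nums: list[int], game: str = "535") -> bool:
--     """Same checks without sorting: min/max for spread, a set for consecutive runs."""
--     cfg = GAME_CONFIGS[game]
--     if not (cfg["sum_min"] <= sum(nums) <= cfg["sum_max"]):
--         return False
--     if max(nums) - min(nums) < cfg["spread_min"]:
--         return False
--     evens = sum(1 for x in nums if x % 2 == 0)
--     if evens == 0 or evens == len(nums):
--         return False
--     nset = set(nums)
--     consecutive = sum(1 for x in nset if x + 1 in nset)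
--     return consecutive < 4
-- ===== Notes on version B (the rewrite author's own statement) =====
-- stated objective: simpler
-- what changed: B drops A's sort entirely: it checks the sum range first, uses min/max for the spread check, and replaces the sorted-adjacency consecutive count with a set-membership count of distinct values x having x+1 present.
import Mathlib
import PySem

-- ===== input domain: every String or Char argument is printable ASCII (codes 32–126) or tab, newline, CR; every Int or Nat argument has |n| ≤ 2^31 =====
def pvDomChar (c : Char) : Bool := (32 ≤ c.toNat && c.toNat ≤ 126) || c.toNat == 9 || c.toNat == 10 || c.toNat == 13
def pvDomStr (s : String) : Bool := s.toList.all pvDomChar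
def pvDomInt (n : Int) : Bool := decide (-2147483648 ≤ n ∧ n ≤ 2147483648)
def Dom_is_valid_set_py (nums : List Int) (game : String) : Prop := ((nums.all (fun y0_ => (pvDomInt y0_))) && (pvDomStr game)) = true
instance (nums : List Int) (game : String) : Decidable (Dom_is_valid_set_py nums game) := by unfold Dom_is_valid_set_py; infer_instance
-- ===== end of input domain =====

-- B drops A's sort: sum-range first, then min/max for the spread, and a set-membership
-- count (x and x+1 both present, over distinct values) instead of the sorted-adjacency
-- consecutive count; objective: simpler (no sort), same results.

-- ===== PORT A =====
-- GAME_CONFIGS[game], restricted to the three fields _is_valid_set reads: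
-- (sum_min, sum_max, spread_min); none = KeyError (excluded by Pre_).
def gameConfig? (game : String) : Option (Int × Int × Int) :=
  if game = "535" then some (55, 125, 8)
  else if game = "645" then some (75, 210, 10)
  else if game = "655" then some (85, 240, 12)
  else none

-- the body of _is_valid_set after 'cfg = GAME_CONFIGS[game]', step for step
def aCheck (nums : List Int) (smin smax spread : Int) : Bool :=
  let s := PySem.List.sorted nums (fun x => x) false
  let total := s.sum
  let n := s.length
  if ¬ (smin ≤ total ∧ total ≤ smax) then false
  else
    -- s[-1] and s[0]; none = IndexError (unreachable: the sum check passed)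
    match PySem.List.pyGet? s (-1), PySem.List.pyGet? s 0 with
    | some last, some first =>
      if last - first < spread then false
      else
        let evens := s.countP (fun x => PySem.Int.mod x 2 == 0)
        if evens == 0 || evens == n then false
        else
          -- zip(s, s[1:])
          let consecutive := (s.zip (s.drop 1)).countP (fun p => p.2 - p.1 == 1)
          if 4 ≤ consecutive then false else true
    | _, _ => false

def is_valid_set_py (nums : List Int) (game : String) : Bool :=
  match gameConfig? game with
  | none => false   -- Python raises KeyError here; excluded by Pre_
  | some (smin, smax, spread) => aCheck nums smin smax spread

-- ===== PORT B =====
-- the body of B's _is_valid_set after 'cfg = GAME_CONFIGS[game]', step for step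
def bCheck (nums : List Int) (smin smax spread : Int) : Bool :=
  if ¬ (smin ≤ nums.sum ∧ nums.sum ≤ smax) then false
  else
    -- max(nums), min(nums); none = ValueError (unreachable: the sum check passed)
    match PySem.List.max? nums (fun x => x), PySem.List.min? nums (fun x => x) with
    | some mx, some mn =>
      if mx - mn < spread then false
      else
        let evens := nums.countP (fun x => PySem.Int.mod x 2 == 0)
        if evens == 0 || evens == nums.length then false
        else
          let nset := PySem.Set.ofList nums
          let consecutive := nset.countP (fun x => PySem.Set.contains nset (x + 1))
          decide (consecutive < 4)
    | _, _ => false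

def is_valid_set_py_alt (nums : List Int) (game : String) : Bool :=
  match gameConfig? game with
  | none => false   -- Python raises KeyError here; excluded by Pre_
  | some (smin, smax, spread) => bCheck nums smin smax spread

-- ===== PRECONDITION & SPEC =====
-- Pre_ excludes only games absent from GAME_CONFIGS, on which A (and B) raise KeyError.
def Pre_is_valid_set_py (_nums : List Int) (game : String) : Prop :=
  game = "535" ∨ game = "645" ∨ game = "655"
instance (nums : List Int) (game : String) : Decidable (Pre_is_valid_set_py nums game) := by
  unfold Pre_is_valid_set_py; infer_instance

def pvWitness_is_valid_set_py : List Int × String := ([11, 14, 17, 22, 25], "535")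

def Spec_is_valid_set_py (nums : List Int) (game : String) (out : Bool) : Prop := out = is_valid_set_py_alt nums game
instance (nums : List Int) (game : String) (out : Bool) : Decidable (Spec_is_valid_set_py nums game out) := by unfold Spec_is_valid_set_py; infer_instance

-- ===== CLAIM (what is proved, stated in full; the proofs are below) =====
def Claim_equal_is_valid_set_py : Prop := ∀ (nums : List Int) (game : String), Dom_is_valid_set_py nums game → Pre_is_valid_set_py nums game → Spec_is_valid_set_py nums game (is_valid_set_py nums game)

-- ===== LEMMAS AND PROOFS =====

-- a Nodup list's countP is the card of the filtered toFinset
lemma countP_eq_card_filter {l : List Int} (p : Int → Bool) (h : l.Nodup) :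
    l.countP p = (l.toFinset.filter (fun x => p x = true)).card := by
  rw [List.countP_eq_length_filter, ← List.toFinset_card_of_nodup (h.filter p),
    List.toFinset_filter]

-- last element of a ≤-sorted list bounds every element
lemma le_getLast_of_pairwise {l : List Int} (hp : l.Pairwise (· ≤ ·)) (hne : l ≠ []) :
    ∀ x ∈ l, x ≤ l.getLast hne := by
  induction l with
  | nil => simp at hne
  | cons a t ih =>
    intro x hx
    cases t with
    | nil => simp at hx; simp [hx]
    | cons b t2 =>
      rw [List.getLast_cons (by simp)]
      rcases List.mem_cons.mp hx with rfl | hxt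
      · exact le_trans (List.rel_of_pairwise_cons hp (by simp))
          (ih hp.of_cons (by simp) b (by simp))
      · exact ih hp.of_cons (by simp) x hxt

-- the crux: on a ≤-sorted list, the sorted-adjacency consecutive count equals
-- the number of distinct values x with x+1 also present
lemma adjCount_eq_card (s : List Int) : s.Pairwise (· ≤ ·) →
    (s.zip (s.drop 1)).countP (fun p => p.2 - p.1 == 1)
      = (s.toFinset.filter (fun x => x + 1 ∈ s)).card := by
  induction s with
  | nil => intro _; simp
  | cons a t ih =>
    intro hp
    cases t with
    | nil =>
      have hne : ¬ (a + 1 = a) := by omega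
      simp [Finset.filter_singleton, hne]
    | cons b t2 =>
      have hab : a ≤ b := List.rel_of_pairwise_cons hp (by simp)
      have hble : ∀ x ∈ b :: t2, b ≤ x := by
        intro x hx
        rcases List.mem_cons.mp hx with rfl | hxt
        · exact le_refl x
        · exact List.rel_of_pairwise_cons hp.of_cons hxt
      have ih' := ih hp.of_cons
      have hzip : (a::b::t2).zip ((a::b::t2).drop 1) = (a,b) :: ((b::t2).zip ((b::t2).drop 1)) := by
        simp [List.zip]
      rw [hzip, List.countP_cons, ih']
      by_cases hq : a = b
      · -- duplicate head: nothing changes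
        subst hq
        have h1 : (a::a::t2).toFinset = (a::t2).toFinset := by simp
        have h2 : ((a::a::t2).toFinset.filter (fun x => x + 1 ∈ (a::a::t2)))
            = ((a::t2).toFinset.filter (fun x => x + 1 ∈ (a::t2))) := by
          rw [h1]; apply Finset.filter_congr; intro x _; simp
        rw [h2]
        simp
      · have hlt : a < b := lt_of_le_of_ne hab hq
        have hTmem : ∀ x ∈ (b::t2).toFinset, (x + 1 ∈ (a::b::t2)) ↔ (x + 1 ∈ (b::t2)) := by
          intro x hx
          have hbx : b ≤ x := hble x (List.mem_toFinset.mp hx)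
          constructor
          · intro h; rcases List.mem_cons.mp h with h' | h'
            · omega
            · exact h'
          · intro h; exact List.mem_cons_of_mem _ h
        have hfT : ((b::t2).toFinset.filter (fun x => x + 1 ∈ (a::b::t2)))
            = ((b::t2).toFinset.filter (fun x => x + 1 ∈ (b::t2))) :=
          Finset.filter_congr (fun x hx => hTmem x hx)
        have hnotin : a ∉ (b::t2).toFinset := by
          intro h; exact absurd (hble a (List.mem_toFinset.mp h)) (by omega)
        have hins : (a::b::t2).toFinset = insert a (b::t2).toFinset := by simp
        rw [hins, Finset.filter_insert, hfT]
        have hcond : (a + 1 ∈ (a::b::t2)) ↔ b = a + 1 := by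
          constructor
          · intro h
            rcases List.mem_cons.mp h with h' | h'
            · omega
            · have := hble _ h'; omega
          · intro h; rw [h]; exact List.mem_cons_of_mem _ (by simp)
        by_cases hc : b = a + 1
        · have : (b - a == 1) = true := by simp; omega
          rw [this]
          rw [if_pos (hcond.mpr hc)]
          rw [Finset.card_insert_of_notMem (by intro h; exact hnotin (Finset.mem_filter.mp h).1)]
          simp
        · have : (b - a == 1) = false := by simp; omega
          rw [this]
          rw [if_neg (fun h => hc (hcond.mp h))]
          simp

-- B's set-based consecutive count, as a Finset card
lemma setCount_eq_card (nums : List Int) :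
    (PySem.Set.ofList nums).countP (fun x => PySem.Set.contains (PySem.Set.ofList nums) (x + 1))
      = (nums.toFinset.filter (fun x => x + 1 ∈ nums)).card := by
  rw [← PySem.List.dedup_eq_ofList]
  rw [countP_eq_card_filter _ (PySem.List.nodup_dedup nums)]
  congr 1
  · apply Finset.ext
    intro x
    simp [PySem.List.mem_dedup, PySem.Set.contains, -PySem.List.dedup_eq_ofList]

-- s[-1] and s[0] of a nonempty list
lemma pyGet?_neg_one {s : List Int} (h : s ≠ []) :
    PySem.List.pyGet? s (-1) = some (s.getLast h) := by
  have hl : 1 ≤ s.length := List.length_pos_of_ne_nil h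
  simp [PySem.List.pyGet?, PySem.List.pyIdx?, hl, List.getLast_eq_getElem,
    List.getElem?_eq_getElem (by omega : s.length - 1 < s.length)]

lemma pyGet?_zero {s : List Int} (h : s ≠ []) :
    PySem.List.pyGet? s 0 = some (s.head h) := by
  have hl0 : 0 < s.length := List.length_pos_of_ne_nil h
  simp [PySem.List.pyGet?, PySem.List.pyIdx?, hl0, List.head_eq_getElem]

lemma check_eq (nums : List Int) (smin smax spread : Int) :
    aCheck nums smin smax spread = bCheck nums smin smax spread := by
  simp only [aCheck, bCheck]
  have hperm := PySem.List.sorted_perm nums (fun x => x) false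
  rw [hperm.sum_eq]
  by_cases hsum : smin ≤ nums.sum ∧ nums.sum ≤ smax
  case neg => rw [if_pos hsum, if_pos hsum]
  rw [if_neg (not_not_intro hsum), if_neg (not_not_intro hsum)]
  cases nums with
  | nil => rfl
  | cons h0 t0 =>
    have hsne : PySem.List.sorted (h0::t0) (fun x => x) false ≠ [] := by
      intro hc
      rw [PySem.List.sorted_eq_nil_iff] at hc
      exact List.cons_ne_nil h0 t0 hc
    rw [pyGet?_neg_one hsne, pyGet?_zero hsne]
    cases hmx : PySem.List.max? (h0::t0) (fun x => x) with
    | none => exact absurd ((PySem.List.max?_eq_none_iff _ _).mp hmx) (List.cons_ne_nil h0 t0)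
    | some mx =>
    cases hmn : PySem.List.min? (h0::t0) (fun x => x) with
    | none => exact absurd ((PySem.List.min?_eq_none_iff _ _).mp hmn) (List.cons_ne_nil h0 t0)
    | some mn =>
    have hpw := PySem.List.sorted_pairwise (h0::t0) (fun x => x)
    have hlast : (PySem.List.sorted (h0::t0) (fun x => x) false).getLast hsne = mx := by
      apply le_antisymm
      · exact PySem.List.max?_isMax hmx _
          ((PySem.List.mem_sorted _ _ _ _).mp (List.getLast_mem hsne))
      · exact le_getLast_of_pairwise hpw hsne mx
          ((PySem.List.mem_sorted _ _ _ _).mpr (PySem.List.max?_mem hmx))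
    have hhead : (PySem.List.sorted (h0::t0) (fun x => x) false).head hsne = mn := by
      obtain ⟨m, t', hst⟩ := List.exists_cons_of_ne_nil hsne
      have hm : (PySem.List.sorted (h0::t0) (fun x => x) false).head hsne = m := by
        simp [hst]
      rw [hm]
      apply le_antisymm
      · exact PySem.List.key_head_sorted_le (h0::t0) (fun x => x) hst mn
          (PySem.List.min?_mem hmn)
      · refine PySem.List.min?_isMin hmn _ ?_
        rw [← PySem.List.mem_sorted (h0::t0) (fun x => x) false, hst]
        exact List.mem_cons_self
    rw [hlast, hhead]
    dsimp only
    by_cases hsp : mx - mn < spread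
    · rw [if_pos hsp, if_pos hsp]
    rw [if_neg hsp, if_neg hsp]
    rw [hperm.countP_eq, hperm.length_eq]
    by_cases hev : ((h0::t0).countP (fun x => PySem.Int.mod x 2 == 0) == 0
        || (h0::t0).countP (fun x => PySem.Int.mod x 2 == 0) == (h0::t0).length) = true
    · rw [if_pos hev, if_pos hev]
    rw [if_neg hev, if_neg hev]
    rw [adjCount_eq_card _ hpw, setCount_eq_card]
    have hfeq : ((PySem.List.sorted (h0::t0) (fun x => x) false).toFinset.filter
          (fun x => x + 1 ∈ PySem.List.sorted (h0::t0) (fun x => x) false))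
        = ((h0::t0).toFinset.filter (fun x => x + 1 ∈ (h0::t0))) := by
      have ht : (PySem.List.sorted (h0::t0) (fun x => x) false).toFinset = (h0::t0).toFinset := by
        apply Finset.ext
        intro x
        simp [List.mem_toFinset, hperm.mem_iff]
      rw [ht]
      apply Finset.filter_congr
      intro x _
      simp [hperm.mem_iff]
    rw [hfeq]
    set c := ((h0::t0).toFinset.filter (fun x => x + 1 ∈ (h0::t0))).card with hc
    by_cases h4 : 4 ≤ c
    · rw [if_pos h4]
      simp [decide_eq_false (by omega : ¬ c < 4)]
    · rw [if_neg h4]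
      simp [decide_eq_true (by omega : c < 4)]

-- ===== VERDICT (by name: the statement is the Claim_ definition above) =====
theorem is_valid_set_py_spec : Claim_equal_is_valid_set_py := by
  intro nums game _ _
  unfold Spec_is_valid_set_py is_valid_set_py is_valid_set_py_alt
  cases h : gameConfig? game with
  | none => rfl
  | some cfg => exact check_eq nums cfg.1 cfg.2.1 cfg.2.2
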